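-- pv_equiv track=rewrite | github.com/mathijshenquet/cairn | src/cairn/run/spans.py | _reduce_group
-- ===== SOURCE A (Python) =====
-- _PRIORITY: dict[str, int] = {
--     "error": 6,
--     "awaiting_input": 5,
--     "awaiting_group": 4,
--     "running": 3,
--     "pending": 2,
--     "cancelled": 1,
--     "ok": 0,
--     "cached": 0,
-- }
--
-- def _reduce_group(statuses: list[str]) -> str:
--     if not statuses:
--         return "ok"
--     non_terminal = [
--         x for x in statuses
--         if x not in ("ok", "cached", "error", "cancelled")
--     ]
--     if not non_terminal:
--         if "error" in statuses:
--             return "error"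
--         if "cancelled" in statuses:
--             return "cancelled"
--         return "ok"
--     # Error bubbles up even if some are non-terminal
--     if "error" in statuses:
--         return "error"
--     return max(non_terminal, key=lambda x: _PRIORITY.get(x, 0))
-- ===== SOURCE B (Python) =====
-- _PRIORITY: dict[str, int] = {
--     "error": 6,
--     "awaiting_input": 5,
--     "awaiting_group": 4,
--     "running": 3,
--     "pending": 2,
--     "cancelled": 1,
--     "ok": 0,
--     "cached": 0,
-- }
--
-- def _reduce_group(statuses: list[str]) -> str:
--     # single pass: flags + best non-terminal (first wins on priority ties)
--     has_error = False
--     has_cancelled = False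
--     best = None
--     for x in statuses:
--         if x == "error":
--             has_error = True
--         elif x == "cancelled":
--             has_cancelled = True
--         elif x == "ok" or x == "cached":
--             pass
--         else:
--             if best is None or _PRIORITY.get(best, 0) < _PRIORITY.get(x, 0):
--                 best = x
--     if has_error:
--         return "error"
--     if best is not None:
--         return best
--     if has_cancelled:
--         return "cancelled"
--     return "ok"
-- ===== Notes on version B (the rewrite author's own statement) =====
-- stated objective: alternative
-- what changed: Replaced the intermediate filtered list plus separate membership scans and a max() pass by one fold over the input maintaining two flags and the current best non-terminal status.
import Mathlib
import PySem

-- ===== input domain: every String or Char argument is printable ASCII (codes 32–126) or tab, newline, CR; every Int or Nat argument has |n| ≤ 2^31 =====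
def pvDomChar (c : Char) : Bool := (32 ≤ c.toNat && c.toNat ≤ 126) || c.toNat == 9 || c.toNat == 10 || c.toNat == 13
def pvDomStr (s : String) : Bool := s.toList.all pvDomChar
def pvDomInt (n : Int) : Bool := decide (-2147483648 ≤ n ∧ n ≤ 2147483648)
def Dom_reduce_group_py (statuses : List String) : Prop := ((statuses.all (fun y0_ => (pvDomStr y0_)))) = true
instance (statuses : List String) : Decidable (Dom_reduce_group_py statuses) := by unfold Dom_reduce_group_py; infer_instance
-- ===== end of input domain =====

-- B replaces A's intermediate filtered list, membership scans and max() by one fold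
-- keeping two flags and the best non-terminal status (O(1) extra space).


-- ===== PORT A =====
-- module constant _PRIORITY (shared by both Pythons)
def pvPriority : PySem.Dict String Int :=
  ⟨[("error", 6), ("awaiting_input", 5), ("awaiting_group", 4), ("running", 3),
    ("pending", 2), ("cancelled", 1), ("ok", 0), ("cached", 0)]⟩

-- _PRIORITY.get(x, 0)
def pvPrio (x : String) : Int := PySem.Dict.getD pvPriority x 0

def reduce_group_py (statuses : List String) : String :=
  if statuses = [] then "ok"
  else
    let non_terminal := statuses.filter
      (fun x => !(x == "ok" || x == "cached" || x == "error" || x == "cancelled"))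
    if non_terminal = [] then
      if statuses.contains "error" then "error"
      else if statuses.contains "cancelled" then "cancelled"
      else "ok"
    else
      if statuses.contains "error" then "error"
      else
        match PySem.List.max? non_terminal pvPrio with
        | some m => m
        | none => ""   -- unreachable: non_terminal ≠ [] here

-- ===== PORT B =====
-- loop body of Source B's single pass: (has_error, has_cancelled, best)
def pvStep (acc : Bool × Bool × Option String) (x : String) : Bool × Bool × Option String :=
  match acc with
  | (he, hc, best) =>
    if x == "error" then (true, hc, best)
    else if x == "cancelled" then (he, true, best)
    else if x == "ok" || x == "cached" then (he, hc, best)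
    else
      match best with
      | none => (he, hc, some x)
      | some b => if pvPrio b < pvPrio x then (he, hc, some x) else (he, hc, some b)

def reduce_group_py_alt (statuses : List String) : String :=
  match statuses.foldl pvStep (false, false, none) with
  | (he, hc, best) =>
    if he then "error"
    else
      match best with
      | some b => b
      | none => if hc then "cancelled" else "ok"

-- ===== PRECONDITION & SPEC =====
def Spec_reduce_group_py (statuses : List String) (out : String) : Prop := out = reduce_group_py_alt statuses
instance (statuses : List String) (out : String) : Decidable (Spec_reduce_group_py statuses out) := by unfold Spec_reduce_group_py; infer_instance

-- ===== CLAIM (what is proved, stated in full; the proofs are below) =====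
def Claim_equal_reduce_group_py : Prop := ∀ (statuses : List String), Dom_reduce_group_py statuses → Spec_reduce_group_py statuses (reduce_group_py statuses)

-- ===== LEMMAS AND PROOFS =====

-- the inner "best" update is exactly the step of PySem.List.max?
def pvMaxStep (acc : Option String) (x : String) : Option String :=
  match acc with
  | none => some x
  | some m => if pvPrio m < pvPrio x then some x else some m

lemma max?_eq_foldl (xs : List String) :
    PySem.List.max? xs pvPrio = xs.foldl pvMaxStep none := by
  unfold PySem.List.max?
  congr 1
  funext acc x
  cases acc <;> rfl

def pvNT (x : String) : Bool := !(x == "ok" || x == "cached" || x == "error" || x == "cancelled")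

-- characterisation of B's fold
lemma foldl_pvStep (l : List String) (he hc : Bool) (best : Option String) :
    l.foldl pvStep (he, hc, best) =
      (he || l.contains "error", hc || l.contains "cancelled",
       (l.filter pvNT).foldl pvMaxStep best) := by
  induction l generalizing he hc best with
  | nil => simp
  | cons a t ih =>
    by_cases h1 : a = "error"
    · subst h1
      simp [pvStep, pvNT, ih]
    · by_cases h2 : a = "cancelled"
      · subst h2
        simp [pvStep, pvNT, ih]
      · by_cases h3 : a = "ok" ∨ a = "cached"
        · rcases h3 with h3 | h3 <;> subst h3 <;>
            simp [pvStep, pvNT, ih]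
        · have h3a : ¬a = "ok" := fun h => h3 (Or.inl h)
          have h3b : ¬a = "cached" := fun h => h3 (Or.inr h)
          have e1 : ("error" = a) = False := eq_false (fun h => h1 h.symm)
          have e2 : ("cancelled" = a) = False := eq_false (fun h => h2 h.symm)
          have hf : List.filter pvNT (a :: t) = a :: List.filter pvNT t := by
            simp [pvNT, h1, h2, h3a, h3b]
          have hstep : pvStep (he, hc, best) a = (he, hc, pvMaxStep best a) := by
            cases best <;> simp [pvStep, pvMaxStep, h1, h2, h3a, h3b]
            (try (split_ifs <;> rfl))
          rw [List.foldl_cons, hstep, ih, hf, List.foldl_cons]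
          simp [e1, e2]

-- ===== VERDICT (by name: the statement is the Claim_ definition above) =====
theorem reduce_group_py_spec : Claim_equal_reduce_group_py := by
  intro statuses _
  unfold Spec_reduce_group_py reduce_group_py reduce_group_py_alt
  rw [foldl_pvStep]
  by_cases hnil : statuses = []
  · subst hnil; simp
  · rw [if_neg hnil]
    have hfe : (statuses.filter
        (fun x => !(x == "ok" || x == "cached" || x == "error" || x == "cancelled"))) =
        statuses.filter pvNT := rfl
    rw [hfe]
    by_cases hfil : statuses.filter pvNT = []
    · rw [if_pos hfil, hfil]
      by_cases herr : "error" ∈ statuses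
      · simp [herr]
      · by_cases hcan : "cancelled" ∈ statuses <;> simp [herr, hcan]
    · rw [if_neg hfil, ← max?_eq_foldl]
      by_cases herr : "error" ∈ statuses
      · simp [herr]
      · rcases h : PySem.List.max? (statuses.filter pvNT) pvPrio with _ | m
        · exact absurd ((PySem.List.max?_eq_none_iff _ _).mp h) hfil
        · simp [herr]
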